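-- pv_equiv track=rewrite | github.com/iesl/s-diora | outside_index.py | get_leaf
-- ===== SOURCE A (Python) =====
-- def get_leaf(n):
--     node2leaf = {}
--
--     for level in range(1, n):
--         L = n - level
--         for pos in range(L):
--             node2leaf[(level, pos)] = []
--             for i in range(L-1):
--                 offset = level + 1
--                 leaf =  (pos + offset + i) % n
--                 node2leaf[(level, pos)].append(leaf)
--
--     return node2leaf
-- ===== SOURCE B (Python) =====
-- def get_leaf(n):
--     base = list(range(n)) * 2
--     node2leaf = {}
--     for level in range(1, n):
--         L = n - level
--         for pos in range(L):
--             start = pos + level + 1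
--             node2leaf[(level, pos)] = base[start:start + (L - 1)]
--     return node2leaf
-- ===== Notes on version B (the rewrite author's own statement) =====
-- stated objective: simpler
-- what changed: Precomputes a doubled range table once and emits each node's leaf list as a single slice of it, eliminating the innermost per-element modulo loop.
import Mathlib
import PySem

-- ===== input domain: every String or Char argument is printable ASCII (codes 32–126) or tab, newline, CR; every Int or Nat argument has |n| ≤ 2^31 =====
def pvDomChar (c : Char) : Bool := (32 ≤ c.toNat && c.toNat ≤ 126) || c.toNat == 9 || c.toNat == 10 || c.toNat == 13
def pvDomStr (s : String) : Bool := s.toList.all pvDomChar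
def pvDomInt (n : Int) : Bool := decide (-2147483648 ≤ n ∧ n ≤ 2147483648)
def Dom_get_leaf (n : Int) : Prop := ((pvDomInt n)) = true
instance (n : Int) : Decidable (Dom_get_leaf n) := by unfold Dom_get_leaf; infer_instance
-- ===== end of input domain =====

-- B replaces the innermost modulo loop of A by one slice of a precomputed doubled range table (simpler inner pass; same asymptotics).

-- ===== PORT A =====
def get_leaf (n : Int) : List (Int × Int × List Int) :=
  let d := (PySem.List.pyRange 1 n 1).foldl (fun d level =>
    let L := n - level
    (PySem.List.pyRange 0 L 1).foldl (fun d pos =>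
      let d := d.insert (level, pos) ([] : List Int)
      (PySem.List.pyRange 0 (L - 1) 1).foldl (fun d i =>
        let offset := level + 1
        let leaf := PySem.Int.mod (pos + offset + i) n
        d.modify (level, pos) [] (fun xs => xs ++ [leaf])) d) d)
    PySem.Dict.empty
  d.items.map (fun kv => (kv.1.1, kv.1.2, kv.2))

-- ===== PORT B =====
def get_leaf_alt (n : Int) : List (Int × Int × List Int) :=
  let base := PySem.List.pyRange 0 n 1 ++ PySem.List.pyRange 0 n 1
  let d := (PySem.List.pyRange 1 n 1).foldl (fun d level =>
    let L := n - level
    (PySem.List.pyRange 0 L 1).foldl (fun d pos =>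
      let start := pos + level + 1
      d.insert (level, pos) (PySem.List.slice base (some start) (some (start + (L - 1))))) d)
    PySem.Dict.empty
  d.items.map (fun kv => (kv.1.1, kv.1.2, kv.2))

-- ===== PRECONDITION & SPEC =====
def Spec_get_leaf (n : Int) (out : List (Int × Int × List Int)) : Prop := out = get_leaf_alt n
instance (n : Int) (out : List (Int × Int × List Int)) : Decidable (Spec_get_leaf n out) := by unfold Spec_get_leaf; infer_instance

-- ===== CLAIM (what is proved, stated in full; the proofs are below) =====
def Claim_equal_get_leaf : Prop := ∀ (n : Int), Dom_get_leaf n → Spec_get_leaf n (get_leaf n)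

-- ===== LEMMAS AND PROOFS =====

-- A's inner append loop, started from d with key k freshly set to v0, is one insert of the mapped list.
theorem pv_inner_fold (f : Int → Int) (xs : List Int) (d : PySem.Dict (Int × Int) (List Int))
    (k : Int × Int) (v0 : List Int) :
    xs.foldl (fun d i => d.modify k [] (fun ys => ys ++ [f i])) (d.insert k v0)
      = d.insert k (v0 ++ xs.map f) := by
  induction xs generalizing v0 with
  | nil => simp
  | cons x xs ih =>
    simp only [List.foldl_cons, List.map_cons]
    rw [show (d.insert k v0).modify k [] (fun ys => ys ++ [f x]) = d.insert k (v0 ++ [f x]) by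
      simp [PySem.Dict.modify, PySem.Dict.getD_insert_self, PySem.Dict.insert_insert_self]]
    rw [ih]
    simp

-- x % n for 0 ≤ x < 2n is x or x - n
theorem pv_emod_two (x n : Int) (h0 : 0 ≤ x) (h2 : x < 2 * n) :
    x % n = if x < n then x else x - n := by
  split_ifs with h
  · exact Int.emod_eq_of_lt h0 h
  · have : x % n = (x - n + 1 * n) % n := by ring_nf
    rw [this, Int.add_mul_emod_self_right]
    exact Int.emod_eq_of_lt (by omega) (by omega)

-- the mapped modulo list IS the slice of the doubled range table
theorem pv_slice_eq (n level pos : Int) (h1 : 1 ≤ level) (hln : level < n)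
    (hp0 : 0 ≤ pos) (hpL : pos < n - level) :
    (PySem.List.pyRange 0 (n - level - 1) 1).map
        (fun i => PySem.Int.mod (pos + (level + 1) + i) n)
      = PySem.List.slice (PySem.List.pyRange 0 n 1 ++ PySem.List.pyRange 0 n 1)
          (some (pos + level + 1)) (some (pos + level + 1 + (n - level - 1))) := by
  have hn : (0:Int) < n := by omega
  have hs0 : (0:Int) ≤ pos + level + 1 := by omega
  rw [PySem.List.slice_toNat _ hs0 (by omega)]
  rw [PySem.List.pyRange_one]
  apply List.ext_getElem
  · simp [PySem.List.length_pyRange_one]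
    omega
  · intro k hk1 hk2
    simp only [List.getElem_map, List.getElem_range, List.getElem_take, List.getElem_drop]
    have hkM : k < (n - level - 1).toNat := by simpa using hk1
    have hbl : (PySem.List.pyRange 0 n 1).length = n.toNat := by
      simp [PySem.List.length_pyRange_one]
    by_cases hcase : (pos + level + 1).toNat + k < n.toNat
    · rw [List.getElem_append_left (by omega)]
      rw [PySem.List.getElem_pyRange_one]
      rw [PySem.Int.mod_eq_emod_of_pos hn]
      rw [pv_emod_two _ _ (by omega) (by omega)]
      rw [if_pos (by omega)]
      push_cast
      omega
    · rw [List.getElem_append_right (by omega)]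
      rw [PySem.List.getElem_pyRange_one]
      rw [PySem.Int.mod_eq_emod_of_pos hn]
      rw [pv_emod_two _ _ (by omega) (by omega)]
      rw [if_neg (by omega)]
      omega

theorem pv_dicts_eq (n : Int) :
    (PySem.List.pyRange 1 n 1).foldl (fun d level =>
      let L := n - level
      (PySem.List.pyRange 0 L 1).foldl (fun d pos =>
        let d := d.insert (level, pos) ([] : List Int)
        (PySem.List.pyRange 0 (L - 1) 1).foldl (fun d i =>
          let offset := level + 1
          let leaf := PySem.Int.mod (pos + offset + i) n
          d.modify (level, pos) [] (fun xs => xs ++ [leaf])) d) d)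
      PySem.Dict.empty
    = (PySem.List.pyRange 1 n 1).foldl (fun d level =>
      let L := n - level
      (PySem.List.pyRange 0 L 1).foldl (fun d pos =>
        let start := pos + level + 1
        d.insert (level, pos)
          (PySem.List.slice (PySem.List.pyRange 0 n 1 ++ PySem.List.pyRange 0 n 1)
            (some start) (some (start + (L - 1))))) d)
      PySem.Dict.empty := by
  apply PySem.List.foldl_congr_mem'
  intro level hlevel d
  have hlv := (PySem.List.mem_pyRange_one).mp hlevel
  apply PySem.List.foldl_congr_mem'
  intro pos hpos d
  have hps := (PySem.List.mem_pyRange_one).mp hpos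
  simp only
  rw [pv_inner_fold (fun i => PySem.Int.mod (pos + (level + 1) + i) n)]
  rw [List.nil_append]
  rw [pv_slice_eq n level pos hlv.1 hlv.2 hps.1 hps.2]

-- ===== VERDICT (by name: the statement is the Claim_ definition above) =====
theorem get_leaf_spec : Claim_equal_get_leaf := by
  intro n _
  unfold Spec_get_leaf get_leaf get_leaf_alt
  simp only
  rw [pv_dicts_eq]
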